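-- pv_equiv track=rewrite | github.com/guptaarth87/datasalt_dashboard_backend | index.py | freq_res
-- ===== SOURCE A (Python) =====
-- def freq_res(month_list):
--    res={'january':0,'febraury':0,'march':0,'april':0,'may':0,'june':0,'july':0,'august':0,'september':0,'october':0,'november':0,'december':0}
--    for month in month_list:
--         if month==1:
--           res['january']+=1
--         elif month==2:
--           res['febraury']+=1
--         elif month==3:
--           res['march']+=1
--         elif month==4:
--           res['april']+=1
--         elif month==5:
--           res['may']+=1
--         elif month==6:
--           res['june']+=1
--         elif month==7:
--           res['july']+=1
--         elif month==8:
--           res['august']+=1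
--         elif month==9:
--           res['september']+=1
--         elif month==10:
--           res['october']+=1
--         elif month==11:
--           res['november']+=1
--         elif month==12:
--           res['december']+=1
--    return res
-- ===== SOURCE B (Python) =====
-- MONTH_NAMES = ['january', 'febraury', 'march', 'april', 'may', 'june',
--                'july', 'august', 'september', 'october', 'november', 'december']
--
-- def freq_res(month_list):
--     # Per-bucket counting: for each of the 12 month numbers, count its
--     # occurrences with list.count; no running dict/accumulator at all.
--     return {name: month_list.count(n) for n, name in enumerate(MONTH_NAMES, 1)}
-- ===== Notes on version B (the rewrite author's own statement) =====
-- stated objective: simpler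
-- what changed: Drops the running dict and the 12-way if/elif dispatch over the input: B makes one list.count pass per month number (12 staged scans keyed by the output table) instead of a single pass accumulating into a dict.
import Mathlib
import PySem

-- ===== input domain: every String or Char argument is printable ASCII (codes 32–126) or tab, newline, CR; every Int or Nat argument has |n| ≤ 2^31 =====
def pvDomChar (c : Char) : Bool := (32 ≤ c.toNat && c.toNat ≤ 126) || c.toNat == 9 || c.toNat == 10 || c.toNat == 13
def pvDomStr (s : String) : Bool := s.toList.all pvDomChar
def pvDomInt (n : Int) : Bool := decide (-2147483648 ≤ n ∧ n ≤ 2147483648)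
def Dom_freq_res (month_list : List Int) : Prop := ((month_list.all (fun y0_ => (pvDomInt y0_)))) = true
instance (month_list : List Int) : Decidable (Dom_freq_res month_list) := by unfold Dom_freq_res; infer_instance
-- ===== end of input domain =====

-- B drops A's running dict and 12-way if/elif dispatch: it counts each month number
-- with a separate list.count scan over the input (objective: simpler).


-- ===== PORT A =====
def freq_res (month_list : List Int) : List (String × Int) :=
  let res0 : PySem.Dict String Int := PySem.Dict.ofList
    [("january",0),("febraury",0),("march",0),("april",0),("may",0),("june",0),
     ("july",0),("august",0),("september",0),("october",0),("november",0),("december",0)]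
  let res := month_list.foldl (fun res month =>
    if month == 1 then res.modify "january" 0 (· + 1)
    else if month == 2 then res.modify "febraury" 0 (· + 1)
    else if month == 3 then res.modify "march" 0 (· + 1)
    else if month == 4 then res.modify "april" 0 (· + 1)
    else if month == 5 then res.modify "may" 0 (· + 1)
    else if month == 6 then res.modify "june" 0 (· + 1)
    else if month == 7 then res.modify "july" 0 (· + 1)
    else if month == 8 then res.modify "august" 0 (· + 1)
    else if month == 9 then res.modify "september" 0 (· + 1)
    else if month == 10 then res.modify "october" 0 (· + 1)
    else if month == 11 then res.modify "november" 0 (· + 1)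
    else if month == 12 then res.modify "december" 0 (· + 1)
    else res) res0
  res.items

-- ===== PORT B =====
def monthNames : List String :=
  ["january","febraury","march","april","may","june",
   "july","august","september","october","november","december"]

def freq_res_alt (month_list : List Int) : List (String × Int) :=
  (PySem.List.enumerate monthNames 1).map (fun p => (p.2, (PySem.List.count month_list p.1 : Int)))

-- ===== PRECONDITION & SPEC =====
def Spec_freq_res (month_list : List Int) (out : List (String × Int)) : Prop := out = freq_res_alt month_list
instance (month_list : List Int) (out : List (String × Int)) : Decidable (Spec_freq_res month_list out) := by unfold Spec_freq_res; infer_instance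

-- ===== CLAIM (what is proved, stated in full; the proofs are below) =====
def Claim_equal_freq_res : Prop := ∀ (month_list : List Int), Dom_freq_res month_list → Spec_freq_res month_list (freq_res month_list)

-- ===== LEMMAS AND PROOFS =====

-- The A-side fold over a dict holding the 12 month keys, with arbitrary current values.
lemma freq_fold (ml : List Int) (c1 c2 c3 c4 c5 c6 c7 c8 c9 c10 c11 c12 : Int) :
    ml.foldl (fun res month =>
      if month == 1 then res.modify "january" 0 (· + 1)
      else if month == 2 then res.modify "febraury" 0 (· + 1)
      else if month == 3 then res.modify "march" 0 (· + 1)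
      else if month == 4 then res.modify "april" 0 (· + 1)
      else if month == 5 then res.modify "may" 0 (· + 1)
      else if month == 6 then res.modify "june" 0 (· + 1)
      else if month == 7 then res.modify "july" 0 (· + 1)
      else if month == 8 then res.modify "august" 0 (· + 1)
      else if month == 9 then res.modify "september" 0 (· + 1)
      else if month == 10 then res.modify "october" 0 (· + 1)
      else if month == 11 then res.modify "november" 0 (· + 1)
      else if month == 12 then res.modify "december" 0 (· + 1)
      else res)
      (PySem.Dict.mk [("january",c1),("febraury",c2),("march",c3),("april",c4),("may",c5),("june",c6),
        ("july",c7),("august",c8),("september",c9),("october",c10),("november",c11),("december",c12)])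
    = PySem.Dict.mk [("january",c1 + ml.count 1),("febraury",c2 + ml.count 2),("march",c3 + ml.count 3),
        ("april",c4 + ml.count 4),("may",c5 + ml.count 5),("june",c6 + ml.count 6),
        ("july",c7 + ml.count 7),("august",c8 + ml.count 8),("september",c9 + ml.count 9),
        ("october",c10 + ml.count 10),("november",c11 + ml.count 11),("december",c12 + ml.count 12)] := by
  induction ml generalizing c1 c2 c3 c4 c5 c6 c7 c8 c9 c10 c11 c12 with
  | nil => simp
  | cons m ms ih =>
    simp only [List.foldl_cons, List.count_cons]
    by_cases h1 : m = 1
    · subst h1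
      show List.foldl _ (PySem.Dict.mk [("january",c1+1),("febraury",c2),("march",c3),("april",c4),("may",c5),("june",c6),("july",c7),("august",c8),("september",c9),("october",c10),("november",c11),("december",c12)]) ms = _
      rw [ih]
      simp
      all_goals omega
    by_cases h2 : m = 2
    · subst h2
      show List.foldl _ (PySem.Dict.mk [("january",c1),("febraury",c2+1),("march",c3),("april",c4),("may",c5),("june",c6),("july",c7),("august",c8),("september",c9),("october",c10),("november",c11),("december",c12)]) ms = _
      rw [ih]
      simp
      all_goals omega
    by_cases h3 : m = 3
    · subst h3
      show List.foldl _ (PySem.Dict.mk [("january",c1),("febraury",c2),("march",c3+1),("april",c4),("may",c5),("june",c6),("july",c7),("august",c8),("september",c9),("october",c10),("november",c11),("december",c12)]) ms = _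
      rw [ih]
      simp
      all_goals omega
    by_cases h4 : m = 4
    · subst h4
      show List.foldl _ (PySem.Dict.mk [("january",c1),("febraury",c2),("march",c3),("april",c4+1),("may",c5),("june",c6),("july",c7),("august",c8),("september",c9),("october",c10),("november",c11),("december",c12)]) ms = _
      rw [ih]
      simp
      all_goals omega
    by_cases h5 : m = 5
    · subst h5
      show List.foldl _ (PySem.Dict.mk [("january",c1),("febraury",c2),("march",c3),("april",c4),("may",c5+1),("june",c6),("july",c7),("august",c8),("september",c9),("october",c10),("november",c11),("december",c12)]) ms = _
      rw [ih]
      simp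
      all_goals omega
    by_cases h6 : m = 6
    · subst h6
      show List.foldl _ (PySem.Dict.mk [("january",c1),("febraury",c2),("march",c3),("april",c4),("may",c5),("june",c6+1),("july",c7),("august",c8),("september",c9),("october",c10),("november",c11),("december",c12)]) ms = _
      rw [ih]
      simp
      all_goals omega
    by_cases h7 : m = 7
    · subst h7
      show List.foldl _ (PySem.Dict.mk [("january",c1),("febraury",c2),("march",c3),("april",c4),("may",c5),("june",c6),("july",c7+1),("august",c8),("september",c9),("october",c10),("november",c11),("december",c12)]) ms = _
      rw [ih]
      simp
      all_goals omega
    by_cases h8 : m = 8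
    · subst h8
      show List.foldl _ (PySem.Dict.mk [("january",c1),("febraury",c2),("march",c3),("april",c4),("may",c5),("june",c6),("july",c7),("august",c8+1),("september",c9),("october",c10),("november",c11),("december",c12)]) ms = _
      rw [ih]
      simp
      all_goals omega
    by_cases h9 : m = 9
    · subst h9
      show List.foldl _ (PySem.Dict.mk [("january",c1),("febraury",c2),("march",c3),("april",c4),("may",c5),("june",c6),("july",c7),("august",c8),("september",c9+1),("october",c10),("november",c11),("december",c12)]) ms = _
      rw [ih]
      simp
      all_goals omega
    by_cases h10 : m = 10
    · subst h10
      show List.foldl _ (PySem.Dict.mk [("january",c1),("febraury",c2),("march",c3),("april",c4),("may",c5),("june",c6),("july",c7),("august",c8),("september",c9),("october",c10+1),("november",c11),("december",c12)]) ms = _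
      rw [ih]
      simp
      all_goals omega
    by_cases h11 : m = 11
    · subst h11
      show List.foldl _ (PySem.Dict.mk [("january",c1),("febraury",c2),("march",c3),("april",c4),("may",c5),("june",c6),("july",c7),("august",c8),("september",c9),("october",c10),("november",c11+1),("december",c12)]) ms = _
      rw [ih]
      simp
      all_goals omega
    by_cases h12 : m = 12
    · subst h12
      show List.foldl _ (PySem.Dict.mk [("january",c1),("febraury",c2),("march",c3),("april",c4),("may",c5),("june",c6),("july",c7),("august",c8),("september",c9),("october",c10),("november",c11),("december",c12+1)]) ms = _
      rw [ih]
      simp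
      all_goals omega
    rw [show (m == 1) = false from beq_eq_false_iff_ne.mpr h1,
        show (m == 2) = false from beq_eq_false_iff_ne.mpr h2,
        show (m == 3) = false from beq_eq_false_iff_ne.mpr h3,
        show (m == 4) = false from beq_eq_false_iff_ne.mpr h4,
        show (m == 5) = false from beq_eq_false_iff_ne.mpr h5,
        show (m == 6) = false from beq_eq_false_iff_ne.mpr h6,
        show (m == 7) = false from beq_eq_false_iff_ne.mpr h7,
        show (m == 8) = false from beq_eq_false_iff_ne.mpr h8,
        show (m == 9) = false from beq_eq_false_iff_ne.mpr h9,
        show (m == 10) = false from beq_eq_false_iff_ne.mpr h10,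
        show (m == 11) = false from beq_eq_false_iff_ne.mpr h11,
        show (m == 12) = false from beq_eq_false_iff_ne.mpr h12]
    simp only [Bool.false_eq_true, if_false, add_zero]
    exact ih c1 c2 c3 c4 c5 c6 c7 c8 c9 c10 c11 c12

theorem freq_res_spec_aux (ml : List Int) : freq_res ml = freq_res_alt ml := by
  unfold freq_res freq_res_alt monthNames
  show (List.foldl _ (PySem.Dict.mk
    [("january",(0:Int)),("febraury",0),("march",0),("april",0),("may",0),("june",0),
     ("july",0),("august",0),("september",0),("october",0),("november",0),("december",0)]) ml).items = _
  rw [freq_fold]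
  simp [PySem.List.enumerate, PySem.List.count]

-- ===== VERDICT (by name: the statement is the Claim_ definition above) =====
theorem freq_res_spec : Claim_equal_freq_res := by
  intro ml _
  exact freq_res_spec_aux ml
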